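-- pv_equiv track=rewrite | github.com/samthiriot/bot.reddit.bonmots | usewiktionnaire.py | remove_nested_emphasis
-- ===== SOURCE A (Python) =====
-- def remove_nested_emphasis(text):
--
--     result = ''
--
--     italics = False
--     bold = False
--
--     for i in range(len(text)):
--         letter = text[i]
--         letter_ = text[i-1] if i-1 >= 0 else None
--         letter__ = text[i-2] if i-2 >= 0 else None
--         letter___ = text[i-3] if i-3 >= 0 else None
--
--         if letter == '_':
--             continue
--
--         # ___
--         if letter_=='_' and letter__=='_' and letter___=='_':
--             if italics and bold:
--                 # we have to close them
--                 italics = False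
--                 bold = False
--                 result = result + '___'
--             elif bold:
--                 # we had bold, we should close bold then add bold italics
--                 result = result + '__ ___'
--                 italics = True
--             elif italics:
--                 # we had italics, we should close italits than add bolditalics
--                 result = result + '_ ___'
--                 bold = True
--             else:
--                 # we had nothing, we should just open everything
--                 italics = True
--                 bold = True
--                 result = result + '___'
--         # __*
--         elif letter_=='_' and letter__=='_':
--             if bold and italics:
--                 # we were in bolditalics, we have to remove bold and keep italics
--                 result = result + '___ _'
--                 bold = False
--             elif bold:
--                 # close bold
--                 result = result + '__'
--                 bold = False
--             elif italics:
--                 # close italics, and open italics+bold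
--                 result = result + '_ ___'
--                 bold = True
--             else:
--                 # open bold
--                 result = result + '__'
--                 bold = True
--         # _**
--         elif letter_=='_':
--             if italics and bold:
--                 # we were in bolditalics, we have to remove italics and keep bold
--                 result = result + '___ __'
--                 italics = False
--             elif italics:
--                 # close italics
--                 result = result + '_'
--                 italics = False
--             elif bold:
--                 # close bold, and open italics+bold
--                 result = result + '__ ___'
--                 italics = True
--             else:
--                 # open italics
--                 result = result + '_'
--                 italics = True
--         # ***
--         #elif letter_ != '_':
--         #    result = result + letter_
--
--         result = result + letter
--
--     # TODO close last
--     if italics and bold: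
--         result = result + '___'
--     elif italics:
--         result = result + '_'
--     elif bold:
--         result = result + '__'
--
--     return result
-- ===== SOURCE B (Python) =====
-- # Table-driven rewrite: group maximal underscore runs in one pass and apply a
-- # (state, run-length) transition table, joining output pieces at the end.
--
-- _TRANS = {  # (state, min(run,3)) -> (emitted string, new state); state bits: 1=italics, 2=bold
--     (0, 1): ('_', 1),      (1, 1): ('_', 0),
--     (2, 1): ('__ ___', 3), (3, 1): ('___ __', 2),
--     (0, 2): ('__', 2),     (1, 2): ('_ ___', 3),
--     (2, 2): ('__', 0),     (3, 2): ('___ _', 1),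
--     (0, 3): ('___', 3),    (1, 3): ('_ ___', 3),
--     (2, 3): ('__ ___', 3), (3, 3): ('___', 0),
-- }
-- _CLOSE = {0: '', 1: '_', 2: '__', 3: '___'}
--
--
-- def remove_nested_emphasis(text):
--     out = []
--     state = 0
--     run = 0
--     for ch in text:
--         if ch == '_':
--             run += 1
--         else:
--             if run:
--                 emitted, state = _TRANS[(state, min(run, 3))]
--                 out.append(emitted)
--             run = 0
--             out.append(ch)
--     out.append(_CLOSE[state])
--     return ''.join(out)
-- ===== Notes on version B (the rewrite author's own statement) =====
-- stated objective: faster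
-- what changed: Replaces A's char-by-char scan with lookbehind indexing (text[i-1..i-3]) and repeated string concatenation by a single pass that groups maximal underscore runs and applies a (state, min(run,3)) lookup-table transition, collecting output pieces in a list joined once at the end.
import Mathlib
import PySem

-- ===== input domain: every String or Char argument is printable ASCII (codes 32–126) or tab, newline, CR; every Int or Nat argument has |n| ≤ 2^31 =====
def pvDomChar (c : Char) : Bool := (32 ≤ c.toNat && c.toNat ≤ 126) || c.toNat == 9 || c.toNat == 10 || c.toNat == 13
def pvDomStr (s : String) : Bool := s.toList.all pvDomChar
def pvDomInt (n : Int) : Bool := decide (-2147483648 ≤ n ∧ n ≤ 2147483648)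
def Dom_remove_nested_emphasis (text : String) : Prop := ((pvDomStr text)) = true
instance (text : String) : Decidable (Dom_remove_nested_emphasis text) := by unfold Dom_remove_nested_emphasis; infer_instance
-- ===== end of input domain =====

-- B groups maximal underscore runs in one pass and applies a (state, run-length)
-- transition table, collecting output pieces in a list joined once at the end
-- (objective: alternative decomposition, avoids A's lookbehind indexing and
-- repeated string concatenation).

-- ===== PORT A =====
-- A's range-loop with lookbehind text[i-1..i-3] is transliterated as the obvious
-- structural recursion carrying the previous three characters (Option Char = None
-- when the index is negative); state and branches are A's, in A's order.
def pvAStep (l3 l2 l1 : Option Char) (letter : Char) (st : String × Bool × Bool) :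
    String × Bool × Bool :=
  match st with
  | (result, italics, bold) =>
    if letter = '_' then (result, italics, bold)   -- continue
    else
      let st' :=
        if l1 = some '_' ∧ l2 = some '_' ∧ l3 = some '_' then
          if italics ∧ bold then (result ++ "___", false, false)
          else if bold then (result ++ "__ ___", true, bold)
          else if italics then (result ++ "_ ___", italics, true)
          else (result ++ "___", true, true)
        else if l1 = some '_' ∧ l2 = some '_' then
          if bold ∧ italics then (result ++ "___ _", italics, false)
          else if bold then (result ++ "__", italics, false)
          else if italics then (result ++ "_ ___", italics, true)
          else (result ++ "__", italics, true)
        else if l1 = some '_' then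
          if italics ∧ bold then (result ++ "___ __", false, bold)
          else if italics then (result ++ "_", false, bold)
          else if bold then (result ++ "__ ___", true, bold)
          else (result ++ "_", true, bold)
        else (result, italics, bold)
      match st' with
      | (r, i, b) => (r ++ letter.toString, i, b)

def pvAWalk (l3 l2 l1 : Option Char) (cs : List Char) (st : String × Bool × Bool) :
    String × Bool × Bool :=
  match cs with
  | [] => st
  | c :: rest => pvAWalk l2 l1 (some c) rest (pvAStep l3 l2 l1 c st)

def remove_nested_emphasis (text : String) : String :=
  match pvAWalk none none none text.toList ("", false, false) with
  | (result, italics, bold) =>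
    if italics ∧ bold then result ++ "___"
    else if italics then result ++ "_"
    else if bold then result ++ "__"
    else result

-- ===== PORT B =====
-- _TRANS dict: (state, min(run,3)) → (emitted string, new state); default unreachable
def pvTrans (state n : Nat) : String × Nat :=
  match state, n with
  | 0, 1 => ("_", 1)      | 1, 1 => ("_", 0)
  | 2, 1 => ("__ ___", 3) | 3, 1 => ("___ __", 2)
  | 0, 2 => ("__", 2)     | 1, 2 => ("_ ___", 3)
  | 2, 2 => ("__", 0)     | 3, 2 => ("___ _", 1)
  | 0, 3 => ("___", 3)    | 1, 3 => ("_ ___", 3)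
  | 2, 3 => ("__ ___", 3) | 3, 3 => ("___", 0)
  | _, _ => ("", 0)

def pvClose (state : Nat) : String :=
  match state with
  | 0 => "" | 1 => "_" | 2 => "__" | 3 => "___"
  | _ => ""   -- other keys would be a KeyError in Python; never reached

def pvBLoop (cs : List Char) (state run : Nat) (out : List String) : List String × Nat :=
  match cs with
  | [] => (out, state)
  | c :: rest =>
    if c = '_' then pvBLoop rest state (run + 1) out
    else if run ≠ 0 then
      match pvTrans state (min run 3) with
      | (e, s') => pvBLoop rest s' 0 (out ++ [e, c.toString])
    else pvBLoop rest state 0 (out ++ [c.toString])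

def remove_nested_emphasis_alt (text : String) : String :=
  match pvBLoop text.toList 0 0 [] with
  | (out, state) => String.join (out ++ [pvClose state])

-- ===== PRECONDITION & SPEC =====
def Spec_remove_nested_emphasis (text : String) (out : String) : Prop := out = remove_nested_emphasis_alt text
instance (text : String) (out : String) : Decidable (Spec_remove_nested_emphasis text out) := by unfold Spec_remove_nested_emphasis; infer_instance

-- ===== CLAIM (what is proved, stated in full; the proofs are below) =====
def Claim_equal_remove_nested_emphasis : Prop := ∀ (text : String), Dom_remove_nested_emphasis text → Spec_remove_nested_emphasis text (remove_nested_emphasis text)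

-- ===== LEMMAS AND PROOFS =====

lemma pv_join_concat (out : List String) (s : String) :
    String.join (out ++ [s]) = String.join out ++ s := by
  simp [String.join, List.foldl_append]

-- encode A's two flags as B's integer state
def pvState (it bo : Bool) : Nat := (if it then 1 else 0) + (if bo then 2 else 0)
def pvIt (s : Nat) : Bool := s = 1 ∨ s = 3
def pvBo (s : Nat) : Bool := s = 2 ∨ s = 3

-- window/run invariant: the carried lookbehind chars encode the pending underscore run
def pvWin (l3 l2 l1 : Option Char) (run : Nat) : Prop :=
  match run with
  | 0 => l1 ≠ some '_'
  | 1 => l1 = some '_' ∧ l2 ≠ some '_'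
  | 2 => l1 = some '_' ∧ l2 = some '_' ∧ l3 ≠ some '_'
  | _ + 3 => l1 = some '_' ∧ l2 = some '_' ∧ l3 = some '_'

lemma pv_join_concat2 (out : List String) (e s : String) :
    String.join (out ++ [e, s]) = String.join out ++ e ++ s := by
  rw [show out ++ [e, s] = (out ++ [e]) ++ [s] by simp, pv_join_concat, pv_join_concat]

lemma pv_join_push (out : List String) (e : String) (c : Char) :
    String.join (out ++ [e, String.singleton c]) = (String.join out ++ e).push c := by
  rw [pv_join_concat2]; simp

lemma pv_walk_eq (cs : List Char) : ∀ (l3 l2 l1 : Option Char) (run : Nat)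
    (it bo : Bool) (out : List String), pvWin l3 l2 l1 run →
    pvAWalk l3 l2 l1 cs (String.join out, it, bo) =
      (String.join (pvBLoop cs (pvState it bo) run out).1,
       pvIt (pvBLoop cs (pvState it bo) run out).2,
       pvBo (pvBLoop cs (pvState it bo) run out).2) := by
  induction cs with
  | nil =>
    intro l3 l2 l1 run it bo out _
    cases it <;> cases bo <;> simp [pvAWalk, pvBLoop, pvState, pvIt, pvBo]
  | cons c rest ih =>
    intro l3 l2 l1 run it bo out hwin
    by_cases hc : c = '_'
    · subst hc
      have h2 : pvWin l2 l1 (some '_') (run + 1) := by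
        match run, hwin with
        | 0, h => exact ⟨rfl, h⟩
        | 1, ⟨h1', h2'⟩ => exact ⟨rfl, h1', h2'⟩
        | 2, ⟨h1', h2', _⟩ => exact ⟨rfl, h1', h2'⟩
        | n + 3, ⟨h1', h2', _⟩ => exact ⟨rfl, h1', h2'⟩
      simp only [pvAWalk, pvBLoop,
        show pvAStep l3 l2 l1 '_' (String.join out, it, bo) = (String.join out, it, bo) by simp [pvAStep]]
      exact ih l2 l1 (some '_') (run + 1) it bo out h2
    · have hwin' : ∀ x y : Option Char, pvWin x y (some c) 0 := fun _ _ => by simpa [pvWin] using hc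
      match run, hwin with
      | 0, h0 =>
        have h0' : l1 ≠ some '_' := h0
        have hstep : pvAStep l3 l2 l1 c (String.join out, it, bo) =
            (String.join (out ++ [c.toString]), it, bo) := by
          simp [pvAStep, hc, h0', pv_join_concat]
        simp only [pvAWalk, pvBLoop, if_neg hc, hstep]
        simpa using ih l2 l1 (some c) 0 it bo (out ++ [c.toString]) (hwin' _ _)
      | 1, ⟨ha, hb⟩ =>
        cases it <;> cases bo <;>
          · simp only [pvAWalk, pvBLoop, pvAStep, pvState, pvTrans, if_neg hc, ha, hb]
            norm_num
            rw [← pv_join_push]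
            first
            | exact ih _ _ _ 0 false false _ (hwin' _ _)
            | exact ih _ _ _ 0 true false _ (hwin' _ _)
            | exact ih _ _ _ 0 false true _ (hwin' _ _)
            | exact ih _ _ _ 0 true true _ (hwin' _ _)
      | 2, ⟨ha, hb, hc2⟩ =>
        cases it <;> cases bo <;>
          · simp only [pvAWalk, pvBLoop, pvAStep, pvState, pvTrans, if_neg hc, ha, hb, hc2]
            norm_num
            rw [← pv_join_push]
            first
            | exact ih _ _ _ 0 false false _ (hwin' _ _)
            | exact ih _ _ _ 0 true false _ (hwin' _ _)
            | exact ih _ _ _ 0 false true _ (hwin' _ _)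
            | exact ih _ _ _ 0 true true _ (hwin' _ _)
      | n + 3, ⟨ha, hb, hc2⟩ =>
        cases it <;> cases bo <;>
          · simp only [pvAWalk, pvBLoop, pvAStep, pvState, pvTrans, if_neg hc, ha, hb, hc2]
            simp only [show min (n + 3) 3 = 3 by omega]
            norm_num
            rw [← pv_join_push]
            first
            | exact ih _ _ _ 0 false false _ (hwin' _ _)
            | exact ih _ _ _ 0 true false _ (hwin' _ _)
            | exact ih _ _ _ 0 false true _ (hwin' _ _)
            | exact ih _ _ _ 0 true true _ (hwin' _ _)

-- ===== VERDICT (by name: the statement is the Claim_ definition above) =====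
theorem remove_nested_emphasis_spec : Claim_equal_remove_nested_emphasis := by
  intro text _
  unfold Spec_remove_nested_emphasis remove_nested_emphasis remove_nested_emphasis_alt
  have h := pv_walk_eq text.toList none none none 0 false false [] (by simp [pvWin])
  rw [show pvState false false = 0 from rfl] at h
  rcases hB : pvBLoop text.toList 0 0 [] with ⟨out, st⟩
  rw [hB] at h
  rw [show ("" : String) = String.join [] from rfl, h]
  match st with
  | 0 => simp [pvIt, pvBo, pvClose, pv_join_concat]
  | 1 => simp [pvIt, pvBo, pvClose, pv_join_concat]
  | 2 => simp [pvIt, pvBo, pvClose, pv_join_concat]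
  | 3 => simp [pvIt, pvBo, pvClose, pv_join_concat]
  | (m + 4) => simp [pvIt, pvBo, pvClose, pv_join_concat]
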